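-- pv_equiv track=rewrite | github.com/generative-protein-design/nyl12-loop-engineering | 2_run_boltz_nyl12.py | split_by_repeating_substring
-- ===== SOURCE A (Python) =====
-- def split_by_repeating_substring(input_str):
--     if len(input_str) < 5:
--         return [(0, len(input_str), input_str)] # Handle small strings
--
--     pattern = input_str[:5] # First 5 characters
--     segments = []
--     start_idx = 0
--     search_idx = 5  # Start searching after the first 5 characters
--
--     while True:
--         next_idx = input_str.find(pattern, search_idx) # Find next occurrence
--         if next_idx == -1:
--             break # No more occurrences
--
--         segments.append((start_idx, next_idx - start_idx, input_str[start_idx:next_idx]))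
--         start_idx = next_idx
--         search_idx = next_idx + 5 # Move forward
--
--     # Add final segment
--     segments.append((start_idx, len(input_str) - start_idx, input_str[start_idx:]))
--
--     return segments
-- ===== SOURCE B (Python) =====
-- def split_by_repeating_substring(input_str):
--     # Enumerate ALL occurrences of the leading 5-char pattern (overlaps included),
--     # then greedily keep the non-overlapping ones as cut points, then build segments.
--     n = len(input_str)
--     pattern = input_str[:5]
--     occs = [i for i in range(5, n - 4) if input_str[i:i+5] == pattern]
--     cuts = [0]
--     last = 0
--     for i in occs:
--         if i >= last + 5:
--             cuts.append(i)
--             last = i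
--     cuts.append(n)
--     return [(c, d - c, input_str[c:d]) for c, d in zip(cuts, cuts[1:])]
-- ===== Notes on version B (the rewrite author's own statement) =====
-- stated objective: alternative
-- what changed: B enumerates ALL (including overlapping) occurrence positions of the leading 5-char pattern with a range comprehension, then a separate greedy pass selects the non-overlapping cut points (keep i if i >= last+5), and a final zip pass over adjacent cut pairs builds the segments; A's find-and-jump while loop and its len<5 guard disappear.
import Mathlib
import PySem

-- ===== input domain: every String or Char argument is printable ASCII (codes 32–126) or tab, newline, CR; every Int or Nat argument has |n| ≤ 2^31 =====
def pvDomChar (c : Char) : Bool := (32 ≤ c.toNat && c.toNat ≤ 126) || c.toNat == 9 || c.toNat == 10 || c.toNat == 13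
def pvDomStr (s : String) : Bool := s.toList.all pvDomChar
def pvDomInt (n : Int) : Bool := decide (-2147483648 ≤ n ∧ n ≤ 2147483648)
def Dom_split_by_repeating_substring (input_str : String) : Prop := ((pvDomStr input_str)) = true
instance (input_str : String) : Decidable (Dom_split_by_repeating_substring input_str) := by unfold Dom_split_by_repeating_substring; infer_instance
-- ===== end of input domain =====

-- B enumerates ALL pattern occurrences via a range filter, then a greedy fold keeps the
-- non-overlapping cut points, then a zip pass builds the segments; alternative decomposition.


-- ===== PORT A =====
-- A's while loop: find next occurrence of pat from search_idx, emit a segment, jump 5 past it.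
-- The proof arguments hp/hk only justify termination (search_idx stays ≤ len and grows by ≥ 5).
def pvLoopA (s pat : List Char) (start_idx search_idx : Nat)
    (hp : pat.length = 5) (hk : search_idx ≤ s.length) : List (Int × Int × String) :=
  if h : PySem.Chars.findFrom s pat (search_idx : Int) none = -1 then
    [((start_idx : Int), (s.length : Int) - (start_idx : Int),
      String.ofList (PySem.List.slice s (some (start_idx : Int)) none))]
  else
    have hspec := PySem.Chars.findFrom_natCast_spec s pat search_idx hk h
    have hk' : (PySem.Chars.findFrom s pat (search_idx : Int) none).toNat + 5 ≤ s.length := by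
      have h1 := hspec.2.1.length_le
      simp only [List.length_drop, hp] at h1
      omega
    ((start_idx : Int), PySem.Chars.findFrom s pat (search_idx : Int) none - (start_idx : Int),
      String.ofList (PySem.List.slice s (some (start_idx : Int))
        (some (PySem.Chars.findFrom s pat (search_idx : Int) none)))) ::
    pvLoopA s pat (PySem.Chars.findFrom s pat (search_idx : Int) none).toNat
      ((PySem.Chars.findFrom s pat (search_idx : Int) none).toNat + 5) hp hk'
termination_by s.length + 1 - search_idx
decreasing_by
  have h2 : search_idx ≤ (PySem.Chars.findFrom s pat (search_idx : Int) none).toNat :=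
    Int.toNat_le_toNat hspec.1 |>.trans_eq' (Int.toNat_natCast search_idx).symm
  omega

def split_by_repeating_substring (input_str : String) : List (Int × Int × String) :=
  let s := input_str.toList
  if h : s.length < 5 then
    [(0, (s.length : Int), input_str)]
  else
    pvLoopA s (PySem.List.slice s none (some 5)) 0 5
      (by
        rw [PySem.List.slice_to s (by omega : (0:Int) ≤ 5)]
        simp only [List.length_take]
        omega)
      (by omega)

-- ===== PORT B =====
def split_by_repeating_substring_alt (input_str : String) : List (Int × Int × String) :=
  let s := input_str.toList
  let n := s.length
  let pattern := PySem.List.slice s none (some 5)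
  -- all occurrence positions of the pattern at index ≥ 5, overlaps included
  let occs := (PySem.List.pyRange 5 ((n : Int) - 4) 1).filter
      (fun i => PySem.List.slice s (some i) (some (i + 5)) == pattern)
  -- greedily keep the non-overlapping ones as cut points (state = (cuts, last))
  let cl := occs.foldl
      (fun (st : List Int × Int) i => if st.2 + 5 ≤ i then (st.1 ++ [i], i) else st)
      ([0], 0)
  let cuts := cl.1 ++ [(n : Int)]
  (cuts.zip cuts.tail).map (fun cd =>
    (cd.1, cd.2 - cd.1, String.ofList (PySem.List.slice s (some cd.1) (some cd.2))))

-- ===== PRECONDITION & SPEC =====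
def Spec_split_by_repeating_substring (input_str : String) (out : List (Int × Int × String)) : Prop := out = split_by_repeating_substring_alt input_str
instance (input_str : String) (out : List (Int × Int × String)) : Decidable (Spec_split_by_repeating_substring input_str out) := by unfold Spec_split_by_repeating_substring; infer_instance

-- ===== CLAIM (what is proved, stated in full; the proofs are below) =====
def Claim_equal_split_by_repeating_substring : Prop := ∀ (input_str : String), Dom_split_by_repeating_substring input_str → Spec_split_by_repeating_substring input_str (split_by_repeating_substring input_str)

-- ===== LEMMAS AND PROOFS =====

-- proof-side canonical cut scan: next cut ≥ k (match → emit and jump 5, else step 1)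
def pvCuts (s pat : List Char) (i : Nat) : List Nat :=
  if i + 5 ≤ s.length then
    if PySem.List.slice s (some (i : Int)) (some ((i : Int) + 5)) = pat then
      i :: pvCuts s pat (i + 5)
    else
      pvCuts s pat (i + 1)
  else []
termination_by s.length - i

-- Segment list generated by a list of interior cut positions (proof-side common shape).
def pvMkSegs (s : List Char) (start : Nat) : List Nat → List (Int × Int × String)
  | [] => [((start : Int), (s.length : Int) - (start : Int), String.ofList (s.drop start))]
  | c :: rest =>
      ((start : Int), (c : Int) - (start : Int), String.ofList ((s.drop start).take (c - start)))
        :: pvMkSegs s c rest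

-- B's zip/map pass over the cast cut list (start :: cs ++ [len]) is exactly pvMkSegs.
lemma pvZip_eq_mkSegs (s : List Char) :
    ∀ (cs : List Nat) (start : Nat),
      ((((start :: cs ++ [s.length]).map (fun x : Nat => (x : Int))).zip
        ((start :: cs ++ [s.length]).map (fun x : Nat => (x : Int))).tail).map (fun cd =>
          (cd.1, cd.2 - cd.1,
            String.ofList (PySem.List.slice s (some cd.1) (some cd.2))))) =
      pvMkSegs s start cs := by
  intro cs
  induction cs with
  | nil =>
      intro start
      simp [pvMkSegs, PySem.List.slice_natCast, List.take_of_length_le]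
  | cons c rest ih =>
      intro start
      simp only [List.cons_append, List.map_cons, List.tail_cons, List.zip_cons_cons,
        List.map_cons, pvMkSegs, PySem.List.slice_natCast]
      refine congrArg _ ?_
      simpa using ih c

-- a prefix match of the 5-char pattern at position k means find-from-k returns k
lemma pvFindFrom_self (s pat : List Char) (k : Nat) (hk : k ≤ s.length)
    (hpre : pat <+: s.drop k) :
    PySem.Chars.findFrom s pat (k : Int) none = (k : Int) := by
  have hnn : 0 ≤ PySem.Chars.find (s.drop k) pat :=
    (PySem.Chars.find_nonneg_iff _ _).2 hpre.isInfix
  have hspec := PySem.Chars.find_spec hnn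
  have h0 : PySem.Chars.find (s.drop k) pat = 0 := by
    by_contra hne
    have hpos : 0 < (PySem.Chars.find (s.drop k) pat).toNat := by omega
    exact hspec.2 0 hpos (by simpa using hpre)
  rw [PySem.Chars.findFrom_natCast s pat k hk, h0]
  simp

-- no match at k: searching from k is the same as searching from k+1
lemma pvFindFrom_step (s pat : List Char) (k : Nat) (hk : k < s.length)
    (hno : ¬ pat <+: s.drop k) :
    PySem.Chars.findFrom s pat (k : Int) none =
      PySem.Chars.findFrom s pat ((k + 1 : Nat) : Int) none := by
  have hdrop : ∀ j : Nat, k ≤ j → List.drop j s <:+: List.drop k s := fun j hj =>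
    (List.drop_suffix_drop_left s hj).isInfix
  by_cases h : PySem.Chars.findFrom s pat (k : Int) none = -1
  · rw [h]
    rw [PySem.Chars.findFrom_natCast_eq_neg_one_iff s pat k (by omega)] at h
    rw [eq_comm, PySem.Chars.findFrom_natCast_eq_neg_one_iff s pat (k + 1) (by omega)]
    intro hin
    exact h (hin.trans (hdrop (k + 1) (by omega)))
  · have hspec := PySem.Chars.findFrom_natCast_spec s pat k (by omega) h
    set m := PySem.Chars.findFrom s pat (k : Int) none with hm
    have h0 : (k : Int) ≤ m := hspec.1
    have hmk : k + 1 ≤ m.toNat := by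
      by_contra hlt
      have hmeq : m.toNat = k := by omega
      exact hno (hmeq ▸ hspec.2.1)
    have h' : PySem.Chars.findFrom s pat ((k + 1 : Nat) : Int) none ≠ -1 := by
      intro he
      rw [PySem.Chars.findFrom_natCast_eq_neg_one_iff s pat (k + 1) (by omega)] at he
      exact he (hspec.2.1.isInfix.trans
        ((List.drop_suffix_drop_left s (by omega : k + 1 ≤ m.toNat)).isInfix))
    have hspec' := PySem.Chars.findFrom_natCast_spec s pat (k + 1) (by omega) h'
    set m' := PySem.Chars.findFrom s pat ((k + 1 : Nat) : Int) none with hm'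
    have h0' : ((k : Int) + 1) ≤ m' := by exact_mod_cast hspec'.1
    have hle1 : m.toNat ≤ m'.toNat := by
      by_contra hlt
      exact hspec.2.2 m'.toNat (by omega) (by omega) hspec'.2.1
    have hle2 : m'.toNat ≤ m.toNat := by
      by_contra hlt
      exact hspec'.2.2 m.toNat (by omega) (by omega) hspec.2.1
    have : m.toNat = m'.toNat := by omega
    omega

-- A's find loop produces exactly the segments generated by the canonical cut positions.
lemma pvLoopA_eq_mkSegs (s pat : List Char) (hp : pat.length = 5) :
    ∀ (fuel k start : Nat) (hk : k ≤ s.length), s.length - k ≤ fuel →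
      pvLoopA s pat start k hp hk = pvMkSegs s start (pvCuts s pat k) := by
  intro fuel
  induction fuel with
  | zero =>
      intro k start hk hfuel
      have hk' : k = s.length := by omega
      have hend : PySem.Chars.findFrom s pat (k : Int) none = -1 := by
        rw [PySem.Chars.findFrom_natCast_eq_neg_one_iff s pat k hk]
        intro hin
        have := hin.length_le
        simp only [List.length_drop, hp, hk'] at this
        omega
      rw [pvLoopA, dif_pos hend, pvCuts, if_neg (by omega)]
      simp [pvMkSegs, PySem.List.slice_from_natCast]
  | succ n ih =>
      intro k start hk hfuel
      by_cases hroom : k + 5 ≤ s.length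
      · by_cases hmatch : PySem.List.slice s (some (k : Int)) (some ((k : Int) + 5)) = pat
        · have hpre : pat <+: s.drop k := by
            rw [List.prefix_iff_eq_take, hp]
            rw [show ((k : Int) + 5) = ((k + 5 : Nat) : Int) by push_cast; ring,
              PySem.List.slice_natCast] at hmatch
            simpa [Nat.add_sub_cancel_left] using hmatch.symm
          have hfind := pvFindFrom_self s pat k hk hpre
          have hne : PySem.Chars.findFrom s pat (k : Int) none ≠ -1 := by
            rw [hfind]; omega
          rw [pvLoopA, dif_neg hne, pvCuts, if_pos hroom, if_pos hmatch]
          simp only [pvMkSegs, hfind, Int.toNat_natCast, PySem.List.slice_natCast]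
          exact congrArg _ (ih (k + 5) k (by omega) (by omega))
        · have hno : ¬ pat <+: s.drop k := by
            intro hpre
            apply hmatch
            rw [show ((k : Int) + 5) = ((k + 5 : Nat) : Int) by push_cast; ring,
              PySem.List.slice_natCast]
            rw [List.prefix_iff_eq_take, hp] at hpre
            simpa [Nat.add_sub_cancel_left] using hpre.symm
          have hstep := pvFindFrom_step s pat k (by omega) hno
          rw [pvCuts, if_pos hroom, if_neg hmatch, ← ih (k + 1) start (by omega) (by omega)]
          rw [pvLoopA, pvLoopA]
          simp only [hstep]
      · have hend : PySem.Chars.findFrom s pat (k : Int) none = -1 := by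
          rw [PySem.Chars.findFrom_natCast_eq_neg_one_iff s pat k hk]
          intro hin
          have := hin.length_le
          simp only [List.length_drop, hp] at this
          omega
        rw [pvLoopA, dif_pos hend, pvCuts, if_neg hroom]
        simp [pvMkSegs, PySem.List.slice_from_natCast]

-- B's greedy fold over the filtered occurrence range yields exactly the canonical cuts.
lemma pvFold_eq_cuts (s pat : List Char) :
    ∀ (fuel k last : Nat) (pre : List Int), s.length - k ≤ fuel →
      (((PySem.List.pyRange (k : Int) ((s.length : Int) - 4) 1).filter
          (fun i => PySem.List.slice s (some i) (some (i + 5)) == pat)).foldl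
        (fun (st : List Int × Int) i => if st.2 + 5 ≤ i then (st.1 ++ [i], i) else st)
        (pre, (last : Int))).1
      = pre ++ (pvCuts s pat (max k (last + 5))).map (fun x : Nat => (x : Int)) := by
  intro fuel
  induction fuel with
  | zero =>
      intro k last pre hfuel
      have hkn : s.length ≤ k := by omega
      rw [PySem.List.pyRange_one_eq_nil (by omega : (s.length : Int) - 4 ≤ (k : Int))]
      rw [pvCuts, if_neg (by omega)]
      simp
  | succ n ih =>
      intro k last pre hfuel
      by_cases hroom : k + 5 ≤ s.length
      · rw [PySem.List.pyRange_one_cons (by omega : (k : Int) < (s.length : Int) - 4)]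
        by_cases hmatch : PySem.List.slice s (some (k : Int)) (some ((k : Int) + 5)) = pat
        · rw [List.filter_cons_of_pos (by simpa using hmatch)]
          rw [List.foldl_cons]
          by_cases hge : (last : Int) + 5 ≤ (k : Int)
          · rw [if_pos hge]
            have hmax : max k (last + 5) = k := by omega
            have h2 := ih (k + 1) k (pre ++ [(k : Int)]) (by omega)
            have hmax2 : max (k + 1) (k + 5) = k + 5 := by omega
            rw [hmax2] at h2
            rw [hmax, pvCuts, if_pos hroom, if_pos hmatch]
            rw [show ((k : Nat) : Int) + 1 = (((k + 1 : Nat)) : Int) by push_cast; ring]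
            simpa [List.append_assoc] using h2
          · rw [if_neg hge]
            have h2 := ih (k + 1) last pre (by omega)
            have hmax : max (k + 1) (last + 5) = max k (last + 5) := by omega
            rw [hmax] at h2
            rw [show ((k : Nat) : Int) + 1 = (((k + 1 : Nat)) : Int) by push_cast; ring]
            exact h2
        · rw [List.filter_cons_of_neg (by simpa using hmatch)]
          rw [show ((k : Nat) : Int) + 1 = (((k + 1 : Nat)) : Int) by push_cast; ring]
          by_cases hge : last + 5 ≤ k
          · have hmax : max k (last + 5) = k := by omega
            have hmax2 : max (k + 1) (last + 5) = k + 1 := by omega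
            have h2 := ih (k + 1) last pre (by omega)
            rw [hmax2] at h2
            rw [hmax]
            conv_rhs => rw [pvCuts]
            rw [if_pos hroom, if_neg hmatch]
            exact h2
          · have h2 := ih (k + 1) last pre (by omega)
            have hmax : max (k + 1) (last + 5) = max k (last + 5) := by omega
            rw [hmax] at h2
            exact h2
      · rw [PySem.List.pyRange_one_eq_nil (by omega : (s.length : Int) - 4 ≤ (k : Int))]
        rw [pvCuts, if_neg (by omega)]
        simp

-- ===== VERDICT (by name: the statement is the Claim_ definition above) =====
theorem split_by_repeating_substring_spec : Claim_equal_split_by_repeating_substring := by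
  intro input_str _
  unfold Spec_split_by_repeating_substring
  unfold split_by_repeating_substring split_by_repeating_substring_alt
  have hfold := pvFold_eq_cuts input_str.toList
    (PySem.List.slice input_str.toList none (some 5)) input_str.toList.length 5 0 [0] (by omega)
  rw [Nat.max_self] at hfold
  simp only [Nat.cast_ofNat, Nat.cast_zero] at hfold
  have hzip := pvZip_eq_mkSegs input_str.toList
    (pvCuts input_str.toList (PySem.List.slice input_str.toList none (some 5)) 5) 0
  simp only [List.map_cons, List.map_append, List.map_nil, Nat.cast_zero,
    List.cons_append] at hzip
  dsimp only
  rw [hfold]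
  rw [List.append_assoc, List.singleton_append]
  rw [hzip]
  by_cases h : input_str.toList.length < 5
  · rw [dif_pos h]
    have hcuts : pvCuts input_str.toList (PySem.List.slice input_str.toList none (some 5)) 5
        = [] := by
      rw [pvCuts]; exact if_neg (by omega)
    rw [hcuts]
    simp [pvMkSegs]
  · rw [dif_neg h]
    exact pvLoopA_eq_mkSegs input_str.toList
      (PySem.List.slice input_str.toList none (some 5)) _ input_str.toList.length 5 0
      (by omega) (by omega)
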